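-- pv_equiv track=rewrite | github.com/masyago/ls_py110 | lesson_1/adj_consonants.py | sort_by_consonant_count
-- ===== SOURCE A (Python) =====
-- def sort_by_consonant_count(given_list):
--     number_tracker = {}
--     for string in given_list:
--         max_consonant_number = count_max_adjacent_consonants(string)
--         number_tracker[string] = max_consonant_number
--     sorted_number_tracker = dict(sorted(number_tracker.items(), key=lambda item: item[1], reverse=True))
--     sorted_list = list(sorted_number_tracker.keys())
--
--     return sorted_list
--
-- def count_max_adjacent_consonants(string):
--     string_without_spaces = string.replace(" ","")
--     max_consonants_count = 0
--     adj_consonants_str = ''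
--     for letter in string_without_spaces:
--         if letter in 'bcdfghjklmnpqrstvwxyz':
--             adj_consonants_str += letter
--             if len(adj_consonants_str) > max_consonants_count:
--                 if len(adj_consonants_str) > 1:
--                     max_consonants_count = len(adj_consonants_str)
--         else:
--             if len(adj_consonants_str) > max_consonants_count:
--                 if len(adj_consonants_str) > 1:
--                     max_consonants_count = len(adj_consonants_str)
--
--             adj_consonants_str = ''
--     return max_consonants_count
-- ===== SOURCE B (Python) =====
-- CONSONANTS = frozenset('bcdfghjklmnpqrstvwxyz')
--
--
-- def _run_lengths(chars):
--     """Lengths of maximal consonant runs in chars, built back-to-front."""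
--     runs = []
--     next_is_consonant = False
--     for ch in reversed(chars):
--         if ch in CONSONANTS:
--             if next_is_consonant:
--                 runs[0] += 1
--             else:
--                 runs.insert(0, 1)
--             next_is_consonant = True
--         else:
--             next_is_consonant = False
--     return runs
--
-- def count_max_adjacent_consonants(string):
--     m = max(_run_lengths([c for c in string if c != ' ']), default=0)
--     return m if m > 1 else 0
--
-- def sort_by_consonant_count(given_list):
--     counts = {s: count_max_adjacent_consonants(s) for s in given_list}
--     return sorted(counts, key=counts.get, reverse=True)
-- ===== Notes on version B (the rewrite author's own statement) =====
-- stated objective: alternative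
-- what changed: The per-string counter now builds the list of consonant-run lengths back-to-front (one deferred max with the >1 guard at the end) instead of A's character-buffer scan with an eagerly updated running max, and the main function sorts the dict's keys directly by counts.get instead of sorting the items, rebuilding a dict and reading its keys.
import Mathlib
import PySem

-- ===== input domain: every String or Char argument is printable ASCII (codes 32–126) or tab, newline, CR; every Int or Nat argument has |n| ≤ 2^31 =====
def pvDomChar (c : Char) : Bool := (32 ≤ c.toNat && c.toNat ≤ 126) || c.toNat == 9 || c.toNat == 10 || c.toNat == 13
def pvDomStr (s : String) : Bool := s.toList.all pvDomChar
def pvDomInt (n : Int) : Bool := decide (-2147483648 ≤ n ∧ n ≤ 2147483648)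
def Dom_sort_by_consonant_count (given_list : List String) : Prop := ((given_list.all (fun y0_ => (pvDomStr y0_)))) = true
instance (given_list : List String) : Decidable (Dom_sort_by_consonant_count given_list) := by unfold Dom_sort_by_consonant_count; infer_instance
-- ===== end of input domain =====

-- B builds the list of consonant-run lengths back-to-front and takes one max at the end, instead of
-- A's char-buffer scan with an eager running max; an alternative decomposition, same cost.

-- ===== PORT A =====

-- 'letter in "bcdfghjklmnpqrstvwxyz"' is Python's substring test; for the one-character needle
-- this is PySem.Chars.isIn [letter] … (exact).
def count_max_adjacent_consonants (string : String) : Int :=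
  let string_without_spaces := PySem.Str.replace string " " ""
  let st := string_without_spaces.toList.foldl
    (fun (st : Int × List Char) letter =>
      if PySem.Chars.isIn [letter] "bcdfghjklmnpqrstvwxyz".toList then
        let adj := st.2 ++ [letter]
        ((if (adj.length : Int) > st.1 then
            (if (adj.length : Int) > 1 then (adj.length : Int) else st.1)
          else st.1), adj)
      else
        ((if (st.2.length : Int) > st.1 then
            (if (st.2.length : Int) > 1 then (st.2.length : Int) else st.1)
          else st.1), ([] : List Char)))
    (0, [])
  st.1

def sort_by_consonant_count (given_list : List String) : List String :=
  let number_tracker : PySem.Dict String Int :=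
    given_list.foldl (fun d string => d.insert string (count_max_adjacent_consonants string))
      PySem.Dict.empty
  let sorted_number_tracker : PySem.Dict String Int :=
    PySem.Dict.ofList (PySem.List.sorted number_tracker.items (fun item => item.2) true)
  sorted_number_tracker.keys

-- ===== PORT B =====

-- B's CONSONANTS frozenset
def pvConsonants : PySem.Set Char := PySem.Set.ofList "bcdfghjklmnpqrstvwxyz".toList

-- 'for ch in reversed(chars)' = foldl over chars.reverse; 'runs.insert(0, 1)' = PySem.List.insert _ 0 _;
-- 'runs[0] += 1' (reached only with runs nonempty) = pySetD/pyGetD at index 0.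
def pv_run_lengths (chars : List Char) : List Int :=
  (chars.reverse.foldl
    (fun (st : List Int × Bool) ch =>
      if PySem.Set.contains pvConsonants ch then
        ((if st.2 then PySem.List.pySetD st.1 0 (PySem.List.pyGetD st.1 0 0 + 1)
          else PySem.List.insert st.1 0 1), true)
      else (st.1, false))
    ([], false)).1

def count_max_adjacent_consonants_alt (string : String) : Int :=
  let m := PySem.List.maxD (pv_run_lengths (string.toList.filter (fun c => c ≠ ' ')))
    (fun x => x) 0
  if m > 1 then m else 0

-- 'sorted(counts, key=counts.get, reverse=True)': every sorted key is in counts, so counts.get k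
-- is its stored value (ported as getD k 0).
def sort_by_consonant_count_alt (given_list : List String) : List String :=
  let counts : PySem.Dict String Int :=
    given_list.foldl (fun d s => d.insert s (count_max_adjacent_consonants_alt s))
      PySem.Dict.empty
  PySem.List.sorted counts.keys (fun k => counts.getD k 0) true

-- ===== PRECONDITION & SPEC =====
def Spec_sort_by_consonant_count (given_list : List String) (out : List String) : Prop := out = sort_by_consonant_count_alt given_list
instance (given_list : List String) (out : List String) : Decidable (Spec_sort_by_consonant_count given_list out) := by unfold Spec_sort_by_consonant_count; infer_instance

-- ===== CLAIM (what is proved, stated in full; the proofs are below) =====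
def Claim_equal_sort_by_consonant_count : Prop := ∀ (given_list : List String), Dom_sort_by_consonant_count given_list → Spec_sort_by_consonant_count given_list (sort_by_consonant_count given_list)

-- ===== LEMMAS AND PROOFS =====

-- the consonant test both programs use, as a plain Bool on chars
def pvCons (c : Char) : Bool := "bcdfghjklmnpqrstvwxyz".toList.contains c

-- A's loop body, with the substring test rewritten to pvCons
def pvStepA (st : Int × List Char) (letter : Char) : Int × List Char :=
  if pvCons letter then
    ((if ((st.2 ++ [letter]).length : Int) > st.1 then
        (if ((st.2 ++ [letter]).length : Int) > 1 then ((st.2 ++ [letter]).length : Int) else st.1)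
      else st.1), st.2 ++ [letter])
  else
    ((if (st.2.length : Int) > st.1 then
        (if (st.2.length : Int) > 1 then (st.2.length : Int) else st.1)
      else st.1), ([] : List Char))

-- B's loop body, with the set test rewritten to pvCons
def pvStepB (st : List Int × Bool) (ch : Char) : List Int × Bool :=
  if pvCons ch then
    ((if st.2 then PySem.List.pySetD st.1 0 (PySem.List.pyGetD st.1 0 0 + 1)
      else PySem.List.insert st.1 0 1), true)
  else (st.1, false)

-- B's fold, read off the right end of the list
def pvFB (cs : List Char) : List Int × Bool := cs.foldr (fun c st => pvStepB st c) ([], false)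

-- run lengths of a char list: a pending run of length k, then the runs of the rest
-- (zero-length "runs" appear between adjacent non-consonants; they contribute 0 to pvG)
def pvRuns (k : Int) : List Char → List Int
  | [] => [k]
  | c :: cs => if pvCons c then pvRuns (k + 1) cs else k :: pvRuns 0 cs

-- max over runs, runs of length ≤ 1 counting as 0
def pvG : List Int → Int
  | [] => 0
  | r :: rs => max (if r > 1 then r else 0) (pvG rs)

def pvHead : List Char → Bool
  | [] => false
  | c :: _ => pvCons c

lemma pvHead_cons (c : Char) (cs : List Char) : pvHead (c :: cs) = pvCons c := rfl

lemma pvSingle_isIn (c : Char) (l : List Char) :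
    PySem.Chars.isIn [c] l = l.contains c := by
  have h : PySem.Chars.isIn [c] l = true ↔ l.contains c = true := by
    rw [PySem.Chars.isIn_iff_infix, List.contains_iff_mem]
    constructor
    · rintro ⟨s, t, rfl⟩; simp
    · intro h
      obtain ⟨s, t, rfl⟩ := List.append_of_mem h
      exact ⟨s, t, by simp⟩
  exact Bool.eq_iff_iff.mpr h

lemma pvSet_contains (c : Char) :
    PySem.Set.contains pvConsonants c = pvCons c := by
  apply Bool.eq_iff_iff.mpr
  rw [pvConsonants, PySem.Set.contains_iff, PySem.Set.mem_ofList, pvCons, List.contains_iff_mem]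

lemma pvReplace_go (fuel : Nat) : ∀ (l acc : List Char), l.length ≤ fuel →
    PySem.Chars.replace.go [' '] [] fuel l acc = acc.reverse ++ l.filter (fun c => c ≠ ' ') := by
  induction fuel with
  | zero =>
    intro l acc h
    have : l = [] := by cases l <;> simp_all
    subst this; simp [PySem.Chars.replace.go]
  | succ n ih =>
    intro l acc h
    cases l with
    | nil => simp [PySem.Chars.replace.go]
    | cons c t =>
      by_cases hc : c = ' '
      · subst hc
        have h1 : PySem.Chars.replace.go [' '] [] (n + 1) (' ' :: t) acc
            = PySem.Chars.replace.go [' '] [] n t acc := by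
          simp [PySem.Chars.replace.go, List.isPrefixOf]
        rw [h1, ih t acc (by simpa using h)]
        simp
      · have h1 : PySem.Chars.replace.go [' '] [] (n + 1) (c :: t) acc
            = PySem.Chars.replace.go [' '] [] n t (c :: acc) := by
          simp [PySem.Chars.replace.go, List.isPrefixOf, beq_iff_eq, Ne.symm hc]
        rw [h1, ih t (c :: acc) (by simpa using h)]
        simp [hc]

lemma pvReplace_space (s : String) :
    (PySem.Str.replace s " " "").toList = s.toList.filter (fun c => c ≠ ' ') := by
  rw [PySem.Str.toList_replace]
  show PySem.Chars.replace s.toList [' '] [] = _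
  have h0 : PySem.Chars.replace s.toList [' '] []
      = PySem.Chars.replace.go [' '] [] s.toList.length s.toList [] := by
    simp [PySem.Chars.replace]
  rw [h0, pvReplace_go _ _ _ le_rfl]
  simp

lemma pvStepA_eq :
    (fun (st : Int × List Char) letter =>
      if PySem.Chars.isIn [letter] "bcdfghjklmnpqrstvwxyz".toList then
        let adj := st.2 ++ [letter]
        ((if (adj.length : Int) > st.1 then
            (if (adj.length : Int) > 1 then (adj.length : Int) else st.1)
          else st.1), adj)
      else
        ((if (st.2.length : Int) > st.1 then
            (if (st.2.length : Int) > 1 then (st.2.length : Int) else st.1)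
          else st.1), ([] : List Char))) = pvStepA := by
  funext st letter
  simp only [pvStepA, pvSingle_isIn, pvCons]
  rfl

lemma pv_run_lengths_eq (cs : List Char) : pv_run_lengths cs = (pvFB cs).1 := by
  unfold pv_run_lengths pvFB
  rw [List.foldl_reverse]
  have h : (fun (c : Char) (st : List Int × Bool) =>
      (fun (st : List Int × Bool) ch =>
        if PySem.Set.contains pvConsonants ch then
          ((if st.2 then PySem.List.pySetD st.1 0 (PySem.List.pyGetD st.1 0 0 + 1)
            else PySem.List.insert st.1 0 1), true)
        else (st.1, false)) st c)
      = (fun c st => pvStepB st c) := by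
    funext c st
    simp only [pvStepB, pvSet_contains]
  rw [h]

lemma pvInsert_zero (xs : List Int) (v : Int) : PySem.List.insert xs 0 v = v :: xs := by
  simp [PySem.List.insert, PySem.List.sliceIndices]

lemma pvFB_cons (c : Char) (cs : List Char) : pvFB (c :: cs) = pvStepB (pvFB cs) c := rfl

lemma pvFB_snd (cs : List Char) : (pvFB cs).2 = pvHead cs := by
  cases cs with
  | nil => rfl
  | cons c cs =>
    rw [pvFB_cons]
    by_cases hc : pvCons c = true <;> simp [pvStepB, hc, pvHead]

lemma pvFB_ne_nil (cs : List Char) (h : pvHead cs = true) : (pvFB cs).1 ≠ [] := by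
  cases cs with
  | nil => simp [pvHead] at h
  | cons c cs =>
    rw [pvFB_cons]
    rw [pvHead] at h
    by_cases hp : (pvFB cs).2 = true
    · have hne := pvFB_ne_nil cs (by rw [← pvFB_snd]; exact hp)
      obtain ⟨r, rest, hr⟩ := List.exists_cons_of_ne_nil hne
      simp [pvStepB, h, hp, hr, pysem]
    · simp [pvStepB, h, hp, pvInsert_zero]

lemma pvG_nonneg (rs : List Int) : 0 ≤ pvG rs := by
  induction rs with
  | nil => simp [pvG]
  | cons r rs ih => simp only [pvG]; omega

lemma pvG_runs_ge (cs : List Char) : ∀ (k : Int), 1 < k → k ≤ pvG (pvRuns k cs) := by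
  induction cs with
  | nil => intro k hk; simp [pvRuns, pvG]; omega
  | cons c cs ih =>
    intro k hk
    by_cases hc : pvCons c = true
    · simpa [pvRuns, hc] using le_trans (by omega) (ih (k + 1) (by omega))
    · have := pvG_nonneg (pvRuns 0 cs)
      simp [pvRuns, hc, pvG]
      omega

lemma pvRuns_nonneg (cs : List Char) : ∀ (k : Int), 0 ≤ k → ∀ r ∈ pvRuns k cs, 0 ≤ r := by
  induction cs with
  | nil => intro k hk r hr; simp [pvRuns] at hr; omega
  | cons c cs ih =>
    intro k hk r hr
    by_cases hc : pvCons c = true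
    · exact ih (k + 1) (by omega) r (by simpa [pvRuns, hc] using hr)
    · simp [pvRuns, hc] at hr
      rcases hr with rfl | hr
      · exact hk
      · exact ih 0 le_rfl r hr

-- A's fold computes the max of the incoming maxc and the guarded max over the remaining runs
lemma pvA_fold (cs : List Char) : ∀ (m : Int) (adj : List Char),
    0 ≤ m → (1 < (adj.length : Int) → (adj.length : Int) ≤ m) →
    (cs.foldl pvStepA (m, adj)).1 = max m (pvG (pvRuns (adj.length : Int) cs)) := by
  induction cs with
  | nil =>
    intro m adj h0 h1
    simp only [List.foldl_nil, pvRuns, pvG]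
    split_ifs <;> omega
  | cons c cs ih =>
    intro m adj h0 h1
    simp only [List.foldl_cons]
    by_cases hc : pvCons c = true
    · have hstep : pvStepA (m, adj) c =
          ((if (adj.length : Int) + 1 > m then
              (if (adj.length : Int) + 1 > 1 then (adj.length : Int) + 1 else m)
            else m), adj ++ [c]) := by
        simp [pvStepA, hc]
      rw [hstep]
      rw [ih _ (adj ++ [c]) (by split_ifs <;> omega)
        (by intro h; simp only [List.length_append, List.length_singleton] at *; push_cast at *; split_ifs <;> omega)]
      have hg := pvG_runs_ge cs ((adj.length : Int) + 1)
      have hn := pvG_nonneg (pvRuns ((adj.length : Int) + 1) cs)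
      simp only [pvRuns, hc, List.length_append, List.length_singleton]
      push_cast
      split_ifs <;> omega
    · have hstep : pvStepA (m, adj) c =
          ((if (adj.length : Int) > m then
              (if (adj.length : Int) > 1 then (adj.length : Int) else m)
            else m), ([] : List Char)) := by
        simp [pvStepA, hc]
      rw [hstep]
      have hm2 : (if (adj.length : Int) > m then
          (if (adj.length : Int) > 1 then (adj.length : Int) else m) else m) = m := by
        split_ifs <;> omega
      have hruns : pvRuns (adj.length : Int) (c :: cs) = (adj.length : Int) :: pvRuns 0 cs := by
        simp [pvRuns, hc]
      rw [hm2, ih m [] h0 (by simp), hruns]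
      have hn := pvG_nonneg (pvRuns 0 cs)
      simp only [pvG, List.length_nil, Int.natCast_zero]
      split_ifs <;> omega

lemma pvB_bridge (cs : List Char) : ∀ (k : Int), 0 ≤ k →
    (pvRuns k cs).filter (fun r => decide (r ≠ 0)) =
      (if pvHead cs then (k + (pvFB cs).1.headD 0) :: (pvFB cs).1.tail
       else (if k = 0 then [] else [k]) ++ (pvFB cs).1) := by
  induction cs with
  | nil =>
    intro k hk
    by_cases h : k = 0 <;> simp [pvRuns, pvHead, pvFB, h]
  | cons c cs ih =>
    intro k hk
    by_cases hc : pvCons c = true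
    · have hL : (pvRuns k (c :: cs)).filter (fun r => decide (r ≠ 0))
          = (pvRuns (k + 1) cs).filter (fun r => decide (r ≠ 0)) := by
        simp [pvRuns, hc]
      rw [hL, ih (k + 1) (by omega)]
      have hsnd := pvFB_snd cs
      by_cases hh : pvHead cs = true
      · obtain ⟨r, rest, hr⟩ := List.exists_cons_of_ne_nil (pvFB_ne_nil cs hh)
        have hstep : (pvFB (c :: cs)).1 = (r + 1) :: rest := by
          rw [pvFB_cons]
          simp [pvStepB, hc, hsnd, hh, hr, pysem]
        simp only [pvHead_cons, hc, if_true, hh, hr, hstep, List.headD_cons, List.tail_cons]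
        rw [show k + 1 + r = k + (r + 1) by ring]
      · have hstep : (pvFB (c :: cs)).1 = 1 :: (pvFB cs).1 := by
          rw [pvFB_cons]
          simp [pvStepB, hc, hsnd, hh, pvInsert_zero]
        simp only [pvHead_cons, hc, if_true, hh, hstep, List.headD_cons, List.tail_cons,
          Bool.false_eq_true, if_false]
        have : ¬ (k + 1 = 0) := by omega
        simp [this]
    · have hL : (pvRuns k (c :: cs)).filter (fun r => decide (r ≠ 0))
          = (if k = 0 then [] else [k]) ++ (pvRuns 0 cs).filter (fun r => decide (r ≠ 0)) := by
        by_cases h : k = 0 <;> simp [pvRuns, hc, h]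
      have hrest : (pvRuns 0 cs).filter (fun r => decide (r ≠ 0)) = (pvFB cs).1 := by
        rw [ih 0 le_rfl]
        by_cases hh : pvHead cs = true
        · obtain ⟨r, rest, hr⟩ := List.exists_cons_of_ne_nil (pvFB_ne_nil cs hh)
          simp [hh, hr]
        · simp [hh]
      have hstep : (pvFB (c :: cs)).1 = (pvFB cs).1 := by
        rw [pvFB_cons]; simp [pvStepB, hc]
      simp only [hL, hrest, pvHead_cons, hc, hstep, Bool.false_eq_true, if_false]

lemma pvFB_eq_filter (cs : List Char) :
    (pvFB cs).1 = (pvRuns 0 cs).filter (fun r => decide (r ≠ 0)) := by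
  rw [pvB_bridge cs 0 le_rfl]
  by_cases hh : pvHead cs = true
  · obtain ⟨r, rest, hr⟩ := List.exists_cons_of_ne_nil (pvFB_ne_nil cs hh)
    simp [hh, hr]
  · simp [hh]

lemma pvG_filter (rs : List Int) :
    pvG (rs.filter (fun r => decide (r ≠ 0))) = pvG rs := by
  induction rs with
  | nil => rfl
  | cons r rs ih =>
    by_cases h : r = 0
    · subst h
      have hn := pvG_nonneg rs
      rw [show List.filter (fun r => decide (r ≠ 0)) ((0 : Int) :: rs)
          = List.filter (fun r => decide (r ≠ 0)) rs by simp]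
      rw [ih]
      simp only [pvG]
      omega
    · rw [show List.filter (fun r => decide (r ≠ 0)) (r :: rs)
          = r :: List.filter (fun r => decide (r ≠ 0)) rs by simp [h]]
      simp only [pvG, ih]

lemma pvG_mem_or (rs : List Int) : pvG rs = 0 ∨ (pvG rs ∈ rs ∧ 1 < pvG rs) := by
  induction rs with
  | nil => left; rfl
  | cons r rs ih =>
    simp only [pvG]
    rcases ih with h0 | ⟨hm, hgt⟩
    · by_cases hr : r > 1
      · right; simp [hr, h0]; omega
      · left; simp [hr, h0]
    · by_cases hr : r > 1
      · right
        by_cases hle : pvG rs ≤ r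
        · simp [hr, max_eq_left hle]
        · rw [max_eq_right (by omega)]
          exact ⟨by simp [hm], hgt⟩
      · right
        rw [if_neg hr, max_eq_right (pvG_nonneg rs)]
        exact ⟨by simp [hm], hgt⟩

lemma pvG_ge (rs : List Int) : ∀ r ∈ rs, 1 < r → r ≤ pvG rs := by
  induction rs with
  | nil => simp
  | cons x rs ih =>
    intro r hr h1
    rcases List.mem_cons.mp hr with rfl | hr
    · simp only [pvG]
      rw [if_pos (by omega)]
      exact le_max_left _ _
    · exact le_trans (ih r hr h1) (le_max_right _ _)

lemma pvG_eq_ifmax (rs : List Int) (h : ∀ r ∈ rs, 0 ≤ r) :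
    (if PySem.List.maxD rs (fun x => x) 0 > 1 then PySem.List.maxD rs (fun x => x) 0 else 0)
      = pvG rs := by
  cases rs with
  | nil => rfl
  | cons x t =>
    have hmax : PySem.List.maxD (x :: t) (fun x => x) 0 = t.foldl max x := by
      rw [PySem.List.maxD, PySem.List.max?_id_cons]; rfl
    have h1 := PySem.List.le_foldl_max t x
    have h2 := PySem.List.foldl_max_mem t x
    have hMmem : t.foldl max x ∈ x :: t := by
      rcases h2 with h2 | h2
      · rw [h2]; exact List.mem_cons_self
      · exact List.mem_cons_of_mem _ h2
    have hub : ∀ r ∈ x :: t, r ≤ t.foldl max x := by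
      intro r hr
      rcases List.mem_cons.mp hr with rfl | hr
      · exact h1.1
      · exact h1.2 r hr
    rw [hmax]
    by_cases hM : 1 < t.foldl max x
    · have hge := pvG_ge (x :: t) _ hMmem hM
      rcases pvG_mem_or (x :: t) with h0 | ⟨hm, hgt⟩
      · omega
      · have := hub _ hm
        rw [if_pos (by omega)]; omega
    · rcases pvG_mem_or (x :: t) with h0 | ⟨hm, hgt⟩
      · rw [if_neg (by omega), h0]
      · have := hub _ hm; omega

lemma pvCount_eq (s : String) :
    count_max_adjacent_consonants s = count_max_adjacent_consonants_alt s := by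
  unfold count_max_adjacent_consonants count_max_adjacent_consonants_alt
  simp only [pvReplace_space, pvStepA_eq, pv_run_lengths_eq, pvFB_eq_filter]
  rw [pvA_fold _ 0 [] le_rfl (by simp)]
  have hnn : ∀ r ∈ (pvRuns 0 (s.toList.filter (fun c => c ≠ ' '))).filter
      (fun r => decide (r ≠ 0)), 0 ≤ r := by
    intro r hr
    exact pvRuns_nonneg _ 0 le_rfl r (List.mem_of_mem_filter hr)
  rw [pvG_eq_ifmax _ hnn, pvG_filter]
  have := pvG_nonneg (pvRuns ((List.length ([] : List Char) : Int)) (s.toList.filter (fun c => c ≠ ' ')))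
  simp only [List.length_nil, Int.natCast_zero] at *
  omega

lemma pvMap_insertBy (key : String → Int) (x : String × Int) (acc : List (String × Int))
    (hx : key x.1 = x.2) (hacc : ∀ p ∈ acc, key p.1 = p.2) :
    (PySem.List.insertBy (fun a b => decide ((b : String × Int).2 < a.2)) x acc).map Prod.fst
      = PySem.List.insertBy (fun a b => decide (key b < key a)) x.1 (acc.map Prod.fst) := by
  induction acc with
  | nil => simp [PySem.List.insertBy]
  | cons y ys ih =>
    have hy : key y.1 = y.2 := hacc y (by simp)
    by_cases h : y.2 < x.2
    · simp [PySem.List.insertBy, h, hy, hx]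
    · simp only [PySem.List.insertBy, decide_eq_true_eq, h, if_false, List.map_cons, hy, hx]
      rw [ih (fun p hp => hacc p (by simp [hp]))]

lemma pvFold_sorted (key : String → Int) : ∀ (l acc : List (String × Int)),
    (∀ p ∈ l, key p.1 = p.2) → (∀ p ∈ acc, key p.1 = p.2) →
    (l.foldl (fun a x => PySem.List.insertBy (fun a b => decide ((b : String × Int).2 < a.2)) x a) acc).map Prod.fst
      = (l.map Prod.fst).foldl (fun a x => PySem.List.insertBy (fun a b => decide (key b < key a)) x a) (acc.map Prod.fst) := by
  intro l
  induction l with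
  | nil => intro acc _ _; simp
  | cons x xs ih =>
    intro acc hl hacc
    simp only [List.foldl_cons, List.map_cons]
    rw [← pvMap_insertBy key x acc (hl x (by simp)) hacc]
    exact ih _ (fun p hp => hl p (by simp [hp]))
      (fun p hp => by
        rcases (PySem.List.mem_insertBy _ _ _ _).mp hp with rfl | hp
        · exact hl p (by simp)
        · exact hacc p hp)

lemma pvSorted_keys (l : List (String × Int)) (key : String → Int)
    (h : ∀ p ∈ l, key p.1 = p.2) :
    (PySem.List.sorted l (fun p => p.2) true).map Prod.fst
      = PySem.List.sorted (l.map Prod.fst) key true := by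
  rw [PySem.List.sorted_rev_eq_foldl_insertBy, PySem.List.sorted_rev_eq_foldl_insertBy]
  simpa using pvFold_sorted key l [] h (by simp)

lemma pvKeys_ofList (ps : List (String × Int)) :
    (PySem.Dict.ofList ps).keys = PySem.Set.ofList (ps.map Prod.fst) := by
  show (PySem.Dict.empty.update ps).keys = _
  unfold PySem.Dict.update
  rw [PySem.Dict.keys_foldl_insert_key ps (fun p => p.1) (fun _ p => p.2) PySem.Dict.empty]
  rw [PySem.Dict.keys_empty]
  exact PySem.Set.update_empty _

-- ===== VERDICT (by name: the statement is the Claim_ definition above) =====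
theorem sort_by_consonant_count_spec : Claim_equal_sort_by_consonant_count := by
  intro given_list _
  unfold Spec_sort_by_consonant_count sort_by_consonant_count sort_by_consonant_count_alt
  have hfun : (fun (d : PySem.Dict String Int) string =>
        d.insert string (count_max_adjacent_consonants string))
      = (fun (d : PySem.Dict String Int) s =>
        d.insert s (count_max_adjacent_consonants_alt s)) := by
    funext d s; rw [pvCount_eq]
  rw [hfun]
  set d : PySem.Dict String Int :=
    given_list.foldl (fun d s => d.insert s (count_max_adjacent_consonants_alt s))
      PySem.Dict.empty with hd
  have hnodup : d.keys.Nodup := by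
    rw [hd]
    exact PySem.Dict.nodup_keys_foldl_insert given_list
      (fun _ x => count_max_adjacent_consonants_alt x) PySem.Dict.empty
      PySem.Dict.nodup_keys_empty
  have hvals : ∀ p ∈ d.items, (fun k => d.getD k 0) p.1 = p.2 := by
    intro p hp
    exact PySem.Dict.getD_of_mem_items d (by rwa [Prod.mk.eta]) hnodup 0
  have hperm : ((PySem.List.sorted d.items (fun item => item.2) true).map Prod.fst).Perm d.keys := by
    have := (PySem.List.sorted_perm d.items (fun item => item.2) true).map Prod.fst
    simpa [PySem.Dict.keys] using this
  rw [pvKeys_ofList, PySem.Set.ofList_eq_self_of_nodup _ (hperm.nodup_iff.mpr hnodup)]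
  rw [pvSorted_keys d.items (fun k => d.getD k 0) hvals]
  rfl
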